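-- pv_equiv track=rewrite | github.com/A-Evan-S/Advent-Of-Code-2021 | Day_17/day17.py | get_potential_velocity_pairs
-- ===== SOURCE A (Python) =====
-- def get_potential_velocities(minimum, maximum, is_x):
--     potential_vx = []
--     for vx in range(-1000, 1000):
--         x = 0
--         i = 0
--         step_region = []
--         for vxd in range(vx, -1 if is_x else -1000, -1):
--             i += 1
--             x += vxd
--             if minimum <= x <= maximum:
--                 step_region.append(i)
--             if (x > maximum and is_x) or (x < minimum and not is_x):
--                 if step_region:
--                     step_region.append(i - 1)
--                     potential_vx.append((vx, step_region))
--                 break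
--         if minimum <= x <= maximum:
--             if step_region:
--                 step_region.append(-1)
--                 potential_vx.append((vx, step_region))
--     return potential_vx
--
-- def get_potential_velocity_pairs(target_x0, target_x1, target_y0, target_y1):
--     potential_vx = get_potential_velocities(target_x0, target_x1, True)
--     potential_vy = get_potential_velocities(target_y0, target_y1, False)
--     potential_pairs = []
--     for vx, step_region_x in potential_vx:
--         for vy, step_region_y in potential_vy:
--             if any(a in step_region_y for a in step_region_x) or (step_region_x[-1] == -1 and any(a >= step_region_x[-2] for a in step_region_y)):
--                 potential_pairs.append((vx, vy))
--     return potential_pairs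
-- ===== SOURCE B (Python) =====
-- def _tri(k):
--     return k * (k + 1) // 2
--
--
-- def _pos(v, i):
--     # position reached after i steps starting at velocity v (no floor applied):
--     # v + (v-1) + ... + (v-i+1)
--     return i * v - i * (i - 1) // 2
--
--
-- def _x_interval(x0, x1, vx):
--     # x positions are nondecreasing (velocity floors at 0), so the hit steps
--     # form one contiguous interval [lo, hi]; the probe "settles" iff its final
--     # resting position _tri(vx) lies inside the band.
--     cap = vx + 1
--     hits = [i for i in range(1, cap + 1) if x0 <= _pos(vx, min(i, vx)) <= x1]
--     if not hits:
--         return None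
--     settled = x0 <= _tri(vx) <= x1
--     return (hits[0], hits[-1], settled)
--
--
-- def _y_record(y0, y1, vy):
--     # y positions are concave in the step number, so every prefix minimum is
--     # min(first position, current position); that turns the original
--     # "break on leaving downward" scan into closed per-step conditions.
--     T = vy + 1000
--     up_ok = vy >= y0  # no early exit before step i >= 2 iff the first position is >= y0
--     steps = {i for i in range(1, T + 1)
--              if y0 <= _pos(vy, i) <= y1 and (i == 1 or up_ok)}
--     if not steps:
--         return None
--     if up_ok and _pos(vy, T) >= y0:
--         # the probe never drops below the band
--         if _pos(vy, T) <= y1: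
--             return (steps, True, max(steps))
--         return None
--     # the probe leaves downward; the last step still at or above the band is
--     # also recorded
--     m = max(i for i in range(1, T + 1) if _pos(vy, i) >= y0)
--     steps.add(m)
--     return (steps, False, max(steps))
--
--
-- def get_potential_velocity_pairs(target_x0, target_x1, target_y0, target_y1):
--     xrecs = []
--     for vx in range(0, 1000):
--         r = _x_interval(target_x0, target_x1, vx)
--         if r is not None:
--             xrecs.append((vx, r))
--     ysum = []    # (vy, settled, max step), vy ascending
--     bucket = {}  # step -> [vy, ...], vy ascending
--     for vy in range(-1000, 1000):
--         r = _y_record(target_y0, target_y1, vy)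
--         if r is None:
--             continue
--         steps, settled, mx = r
--         ysum.append((vy, settled, mx))
--         for s in steps:
--             bucket.setdefault(s, []).append(vy)
--     pairs = []
--     for vx, (lo, hi, settled_x) in xrecs:
--         if settled_x:
--             # x sits in the band from step lo on forever
--             cands = [vy for (vy, st, mx) in ysum if st or mx >= lo]
--         else:
--             cset = set()
--             for s in range(lo, hi + 1):
--                 cset.update(bucket.get(s, ()))
--             cands = sorted(cset)
--         pairs.extend((vx, vy) for vy in cands)
--     return pairs
-- ===== Notes on version B (the rewrite author's own statement) =====
-- stated objective: alternative
-- what changed: B computes each trajectory's hit steps from the closed-form position i*v - i*(i-1)//2 with monotonicity/concavity-derived conditions instead of A's stateful step-by-step simulation with break, represents the x side as one hit-step interval, and replaces A's nested all-pairs any(a in list) scans with an inverted step->vy bucket index (union of buckets per x interval, plus a max-step threshold test for settled x).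
import Mathlib
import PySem

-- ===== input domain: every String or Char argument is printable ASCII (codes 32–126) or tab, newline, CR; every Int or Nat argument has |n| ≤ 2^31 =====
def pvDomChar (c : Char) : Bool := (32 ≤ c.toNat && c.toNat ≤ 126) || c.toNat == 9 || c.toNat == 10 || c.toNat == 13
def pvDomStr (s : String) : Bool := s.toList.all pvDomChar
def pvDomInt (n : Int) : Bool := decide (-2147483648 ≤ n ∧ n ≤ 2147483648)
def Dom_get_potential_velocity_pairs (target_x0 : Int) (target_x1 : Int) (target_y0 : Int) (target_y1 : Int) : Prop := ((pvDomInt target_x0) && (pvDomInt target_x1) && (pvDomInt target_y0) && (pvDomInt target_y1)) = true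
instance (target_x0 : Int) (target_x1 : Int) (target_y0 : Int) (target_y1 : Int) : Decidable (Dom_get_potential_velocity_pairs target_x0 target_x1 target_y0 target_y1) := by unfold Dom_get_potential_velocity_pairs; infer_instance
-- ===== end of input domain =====

-- B replaces A's step-by-step trajectory simulation by closed-form positions
-- (i*v - i*(i-1)//2) with monotonicity/concavity-derived hit conditions, keeps the
-- x-side hits as one interval, and replaces A's nested all-pairs membership scans by
-- an inverted step→vy index consulted per x-interval (objective: alternative).

-- ===== PORT A =====
-- inner `for vxd in range(vx, …, -1)` loop of get_potential_velocities;
-- returns (broke?, record appended at break (if any), final x, final step_region)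
def pvAInner (mn mx : Int) (b : Bool) : List Int → Int → Int → List Int → Bool × Option (List Int) × Int × List Int
  | [], x, _, sr => (false, none, x, sr)
  | vxd :: rest, x, i, sr =>
    let i2 := i + 1
    let x2 := x + vxd
    let sr2 := if mn ≤ x2 ∧ x2 ≤ mx then sr ++ [i2] else sr
    if (x2 > mx ∧ b = true) ∨ (x2 < mn ∧ b = false) then
      (true, if sr2 ≠ [] then some (sr2 ++ [i2 - 1]) else none, x2, sr2)
    else pvAInner mn mx b rest x2 i2 sr2

-- post-loop processing of one vx (the trailing `if minimum <= x <= maximum` block)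
def pvAOut (mn mx : Int) (r : Bool × Option (List Int) × Int × List Int) : Option (List Int) :=
  if r.1 then r.2.1
  else if mn ≤ r.2.2.1 ∧ r.2.2.1 ≤ mx then
    (if r.2.2.2 ≠ [] then some (r.2.2.2 ++ [-1]) else none)
  else none

def pvAVel (mn mx : Int) (b : Bool) (v : Int) : Option (List Int) :=
  let stop : Int := if b then -1 else -1000
  pvAOut mn mx (pvAInner mn mx b (PySem.List.pyRange v stop (-1)) 0 0 [])

def get_potential_velocities (mn mx : Int) (b : Bool) : List (Int × List Int) :=
  (PySem.List.pyRange (-1000) 1000 1).foldl (fun acc vx =>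
    match pvAVel mn mx b vx with
    | some r => acc ++ [(vx, r)]
    | none => acc) []

-- the pair filter of A; `.elim false` is unreachable where Python would raise
-- (records always have ≥ 2 elements), and matches the short-circuit `and`
def pvAPairCond (srx sry : List Int) : Bool :=
  (srx.any fun a => sry.contains a) ||
  ((PySem.List.pyGet? srx (-1) == some (-1)) &&
    (PySem.List.pyGet? srx (-2)).elim false (fun thr => sry.any fun a => decide (a ≥ thr)))

def get_potential_velocity_pairs (target_x0 : Int) (target_x1 : Int) (target_y0 : Int) (target_y1 : Int) : List (Int × Int) :=
  let pvx := get_potential_velocities target_x0 target_x1 true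
  let pvy := get_potential_velocities target_y0 target_y1 false
  pvx.foldl (fun acc p =>
    pvy.foldl (fun acc2 q =>
      if pvAPairCond p.2 q.2 then acc2 ++ [(p.1, q.1)] else acc2) acc) []

-- ===== PORT B =====
-- _tri(k) = k*(k+1)//2
def pvTri (k : Int) : Int := PySem.Int.floordiv (k * (k + 1)) 2

-- _pos(v, i) = i*v - i*(i-1)//2
def pvPos (v i : Int) : Int := i * v - PySem.Int.floordiv (i * (i - 1)) 2

-- max(s): only applied to nonempty collections in Source B (comment there)
def pvBMax (s : List Int) : Int := (PySem.List.max? s (fun a => a)).getD 0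

-- _x_interval of Source B
def pvXInterval (x0 x1 vx : Int) : Option (Int × Int × Bool) :=
  let cap := vx + 1
  let hits := (PySem.List.pyRange 1 (cap + 1) 1).filter
    (fun i => decide (x0 ≤ pvPos vx (min i vx) ∧ pvPos vx (min i vx) ≤ x1))
  if h : hits = [] then none
  else some (hits.head h, hits.getLast h, decide (x0 ≤ pvTri vx ∧ pvTri vx ≤ x1))

-- _y_record of Source B
def pvYRecord (y0 y1 vy : Int) : Option (PySem.Set Int × Bool × Int) :=
  let T := vy + 1000
  let upOk := decide (y0 ≤ vy)
  let steps : PySem.Set Int :=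
    (PySem.List.pyRange 1 (T + 1) 1).foldl
      (fun s i => if (y0 ≤ pvPos vy i ∧ pvPos vy i ≤ y1) ∧ (i = 1 ∨ upOk = true)
                  then PySem.Set.add s i else s)
      PySem.Set.empty
  if steps = [] then none
  else if upOk = true ∧ y0 ≤ pvPos vy T then
    if pvPos vy T ≤ y1 then some (steps, true, pvBMax steps) else none
  else
    let m := pvBMax ((PySem.List.pyRange 1 (T + 1) 1).filter (fun i => decide (y0 ≤ pvPos vy i)))
    some (PySem.Set.add steps m, false, pvBMax (PySem.Set.add steps m))

-- the `for vy in range(-1000, 1000)` loop building ysum and the step→vy bucket index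
def pvYPhase (y0 y1 : Int) : List (Int × Bool × Int) × PySem.Dict Int (List Int) :=
  (PySem.List.pyRange (-1000) 1000 1).foldl
    (fun p vy =>
      match pvYRecord y0 y1 vy with
      | none => p
      | some r =>
        (p.1 ++ [(vy, r.2.1, r.2.2)],
         r.1.foldl (fun d s => PySem.Dict.modify d s [] (fun l => l ++ [vy])) p.2))
    ([], PySem.Dict.empty)

def get_potential_velocity_pairs_alt (target_x0 : Int) (target_x1 : Int) (target_y0 : Int) (target_y1 : Int) : List (Int × Int) :=
  let xrecs := (PySem.List.pyRange 0 1000 1).foldl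
    (fun acc vx => match pvXInterval target_x0 target_x1 vx with
      | some r => acc ++ [(vx, r)]
      | none => acc) []
  let yb := pvYPhase target_y0 target_y1
  xrecs.foldl (fun pairs q =>
    let cands :=
      if q.2.2.2 = true then
        (yb.1.filter (fun w => w.2.1 || decide (q.2.1 ≤ w.2.2))).map (fun w => w.1)
      else
        PySem.List.sorted
          ((PySem.List.pyRange q.2.1 (q.2.2.1 + 1) 1).foldl
            (fun cs s => PySem.Set.update cs (PySem.Dict.getD yb.2 s [])) PySem.Set.empty)
          (fun v => v) false
    pairs ++ cands.map (fun vy => (q.1, vy))) []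

-- ===== PRECONDITION & SPEC =====
def Spec_get_potential_velocity_pairs (target_x0 : Int) (target_x1 : Int) (target_y0 : Int) (target_y1 : Int) (out : List (Int × Int)) : Prop := out = get_potential_velocity_pairs_alt target_x0 target_x1 target_y0 target_y1
instance (target_x0 : Int) (target_x1 : Int) (target_y0 : Int) (target_y1 : Int) (out : List (Int × Int)) : Decidable (Spec_get_potential_velocity_pairs target_x0 target_x1 target_y0 target_y1 out) := by unfold Spec_get_potential_velocity_pairs; infer_instance

-- ===== CLAIM (what is proved, stated in full; the proofs are below) =====
def Claim_equal_get_potential_velocity_pairs : Prop := ∀ (target_x0 : Int) (target_x1 : Int) (target_y0 : Int) (target_y1 : Int), Dom_get_potential_velocity_pairs target_x0 target_x1 target_y0 target_y1 → Spec_get_potential_velocity_pairs target_x0 target_x1 target_y0 target_y1 (get_potential_velocity_pairs target_x0 target_x1 target_y0 target_y1)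

-- ===== LEMMAS AND PROOFS =====

-- ---------- arithmetic layer: closed-form positions ----------

-- prefix sums of the velocity countdown: position after k steps
def pvS (v : Int) : Nat → Int
  | 0 => 0
  | k+1 => pvS v k + (v - k)

lemma pvS_closed (v : Int) (k : Nat) : 2 * pvS v k = k * (2 * v - k + 1) := by
  induction k with
  | zero => simp [pvS]
  | succ n ih =>
    show 2 * (pvS v n + (v - n)) = _
    push_cast
    push_cast at ih
    nlinarith [ih]

lemma pvPos_eq (v i : Int) (h : 0 ≤ i) : pvPos v i = pvS v i.toNat := by
  have hc := pvS_closed v i.toNat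
  have hi : (i.toNat : Int) = i := Int.toNat_of_nonneg h
  rw [hi] at hc
  have hdvd : i * (i - 1) = 2 * (i * v - pvS v i.toNat) := by nlinarith [hc]
  have : PySem.Int.floordiv (i * (i - 1)) 2 = i * v - pvS v i.toNat := by
    rw [hdvd, PySem.Int.floordiv_eq_ediv_of_pos (by norm_num)]
    exact Int.mul_ediv_cancel_left _ (by norm_num)
  unfold pvPos
  omega

lemma pvTri_eq (v : Int) (h : 0 ≤ v) : pvTri v = pvS v v.toNat := by
  have hc := pvS_closed v v.toNat
  have hi : (v.toNat : Int) = v := Int.toNat_of_nonneg h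
  rw [hi] at hc
  have hdvd : v * (v + 1) = 2 * pvS v v.toNat := by nlinarith [hc]
  unfold pvTri
  rw [hdvd, PySem.Int.floordiv_eq_ediv_of_pos (by norm_num)]
  exact Int.mul_ediv_cancel_left _ (by norm_num)

lemma pvS_plateau (v : Int) (h : 0 ≤ v) : pvS v (v.toNat + 1) = pvS v v.toNat := by
  show pvS v v.toNat + (v - v.toNat) = pvS v v.toNat
  omega

lemma pvS_mono (v : Int) {k j : Nat} (hkj : k ≤ j) (hj : (j : Int) ≤ v + 1) :
    pvS v k ≤ pvS v j := by
  induction j with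
  | zero =>
    have : k = 0 := by omega
    simp [this]
  | succ n ih =>
    by_cases h : k = n + 1
    · simp [h]
    · have hk : k ≤ n := by omega
      have : pvS v k ≤ pvS v n := ih hk (by push_cast at hj ⊢; omega)
      have hstep : pvS v (n + 1) = pvS v n + (v - n) := rfl
      have : (0:Int) ≤ v - n := by push_cast at hj ⊢; omega
      omega

lemma pvS_concave (v : Int) {k j : Nat} (h1 : 1 ≤ k) (hkj : k ≤ j) :
    min (pvS v 1) (pvS v j) ≤ pvS v k := by
  have hck := pvS_closed v k
  have hcj := pvS_closed v j
  have hc1 := pvS_closed v 1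
  by_cases hv : (k : Int) ≤ 2 * v
  · -- rising part: pvS v 1 ≤ pvS v k
    have hkk : (1:Int) ≤ (k:Int) := by exact_mod_cast h1
    have h0 : 0 ≤ ((k:Int) - 1) * (2 * v - k) := mul_nonneg (by omega) (by omega)
    have heq : 2 * pvS v k - 2 * pvS v 1 = ((k:Int) - 1) * (2 * v - k) := by
      linear_combination hck - hc1
    have : pvS v 1 ≤ pvS v k := by omega
    omega
  · -- falling part: pvS v j ≤ pvS v k
    have hkj' : (k:Int) ≤ (j:Int) := by exact_mod_cast hkj
    have hkk : (1:Int) ≤ (k:Int) := by exact_mod_cast h1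
    have h0 : ((j:Int) - k) * (2 * v - (j + k - 1)) ≤ 0 :=
      mul_nonpos_of_nonneg_of_nonpos (by omega) (by omega)
    have heq : 2 * pvS v j - 2 * pvS v k = ((j:Int) - k) * (2 * v - (j + k - 1)) := by
      linear_combination hcj - hck
    have : pvS v j ≤ pvS v k := by omega
    omega

-- ---------- A-side canonical description ----------

def pvHit (mn mx v j : Int) : Bool := decide (mn ≤ pvS v j.toNat ∧ pvS v j.toNat ≤ mx)

def pvBrk (mn mx : Int) (b : Bool) (v j : Int) : Bool :=
  if b then decide (mx < pvS v j.toNat) else decide (pvS v j.toNat < mn)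

def pvN (b : Bool) (v : Int) : Int := v - (if b then (-1) else -1000)

def pvASpec (mn mx : Int) (b : Bool) (v : Int) : Option (List Int) :=
  match (PySem.List.pyRange 1 (pvN b v + 1) 1).find? (pvBrk mn mx b v) with
  | some j =>
      if ((PySem.List.pyRange 1 (j + 1) 1).filter (pvHit mn mx v)) ≠ []
      then some ((PySem.List.pyRange 1 (j + 1) 1).filter (pvHit mn mx v) ++ [j - 1])
      else none
  | none =>
      if (mn ≤ pvS v (pvN b v).toNat ∧ pvS v (pvN b v).toNat ≤ mx)
         ∧ ((PySem.List.pyRange 1 (pvN b v + 1) 1).filter (pvHit mn mx v)) ≠ []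
      then some ((PySem.List.pyRange 1 (pvN b v + 1) 1).filter (pvHit mn mx v) ++ [-1])
      else none

lemma pvAInner_run (mn mx : Int) (b : Bool) (v : Int) :
    ∀ (n : Nat) (i : Int), 0 ≤ i → (pvN b v - i).toNat ≤ n →
      (i ≤ pvN b v ∨ (i = 0 ∧ pvN b v < 0)) →
      pvAOut mn mx (pvAInner mn mx b
          (PySem.List.pyRange (v - i) (if b then (-1 : Int) else -1000) (-1))
          (pvS v i.toNat) i
          ((PySem.List.pyRange 1 (i + 1) 1).filter (pvHit mn mx v)))
        = match (PySem.List.pyRange (i + 1) (pvN b v + 1) 1).find? (pvBrk mn mx b v) with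
          | some j =>
              if ((PySem.List.pyRange 1 (j + 1) 1).filter (pvHit mn mx v)) ≠ []
              then some ((PySem.List.pyRange 1 (j + 1) 1).filter (pvHit mn mx v) ++ [j - 1])
              else none
          | none =>
              if (mn ≤ pvS v (pvN b v).toNat ∧ pvS v (pvN b v).toNat ≤ mx)
                 ∧ ((PySem.List.pyRange 1 (pvN b v + 1) 1).filter (pvHit mn mx v)) ≠ []
              then some ((PySem.List.pyRange 1 (pvN b v + 1) 1).filter (pvHit mn mx v) ++ [-1])
              else none := by
  have hstop : (if b then (-1 : Int) else -1000) = v - pvN b v := by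
    unfold pvN; split <;> ring
  have hTerm : ∀ (i : Int), 0 ≤ i → pvN b v ≤ i → (i ≤ pvN b v ∨ (i = 0 ∧ pvN b v < 0)) →
      pvAOut mn mx (pvAInner mn mx b
          (PySem.List.pyRange (v - i) (if b then (-1 : Int) else -1000) (-1))
          (pvS v i.toNat) i
          ((PySem.List.pyRange 1 (i + 1) 1).filter (pvHit mn mx v)))
        = match (PySem.List.pyRange (i + 1) (pvN b v + 1) 1).find? (pvBrk mn mx b v) with
          | some j =>
              if ((PySem.List.pyRange 1 (j + 1) 1).filter (pvHit mn mx v)) ≠ []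
              then some ((PySem.List.pyRange 1 (j + 1) 1).filter (pvHit mn mx v) ++ [j - 1])
              else none
          | none =>
              if (mn ≤ pvS v (pvN b v).toNat ∧ pvS v (pvN b v).toNat ≤ mx)
                 ∧ ((PySem.List.pyRange 1 (pvN b v + 1) 1).filter (pvHit mn mx v)) ≠ []
              then some ((PySem.List.pyRange 1 (pvN b v + 1) 1).filter (pvHit mn mx v) ++ [-1])
              else none := by
    intro i h0 hge hok
    rw [hstop,
      (show PySem.List.pyRange (v - i) (v - pvN b v) (-1) = []
        from PySem.List.pyRange_neg_one_eq_nil (by omega)),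
      (show PySem.List.pyRange (i + 1) (pvN b v + 1) 1 = []
        from PySem.List.pyRange_one_eq_nil (by omega))]
    simp only [List.find?_nil]
    rcases hok with hle | ⟨rfl, hneg⟩
    · have hiN : i = pvN b v := le_antisymm hle hge
      subst hiN
      simp only [pvAInner, pvAOut]
      split_ifs with hb hne hne2 <;> simp_all
    · have hr : (PySem.List.pyRange 1 (pvN b v + 1) 1) = [] :=
        PySem.List.pyRange_one_eq_nil (by omega)
      have hr0 : (PySem.List.pyRange 1 (0 + 1) 1) = [] :=
        PySem.List.pyRange_one_eq_nil (by omega)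
      simp only [pvAInner, pvAOut, hr, hr0]
      split_ifs <;> simp_all
  intro n
  induction n with
  | zero =>
    intro i h0 hn hok
    exact hTerm i h0 (by omega) hok
  | succ n ih =>
    intro i h0 hn hok
    by_cases hterm : pvN b v ≤ i
    · exact hTerm i h0 hterm hok
    · have hlt : i < pvN b v := by omega
      rw [hstop, PySem.List.pyRange_neg_one_cons (by omega : v - pvN b v < v - i)]
      simp only [pvAInner]
      have hx2 : pvS v i.toNat + (v - i) = pvS v (i + 1).toNat := by
        have h1 : (i + 1).toNat = i.toNat + 1 := by omega
        rw [h1]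
        show _ = pvS v i.toNat + (v - (i.toNat : Int))
        have : ((i.toNat : Int)) = i := Int.toNat_of_nonneg h0
        rw [this]
      have hhit : (mn ≤ pvS v i.toNat + (v - i) ∧ pvS v i.toNat + (v - i) ≤ mx)
          ↔ pvHit mn mx v (i + 1) = true := by
        rw [hx2]; unfold pvHit; simp
      have hsr2 : ∀ l : List Int,
          (if mn ≤ pvS v i.toNat + (v - i) ∧ pvS v i.toNat + (v - i) ≤ mx
           then l.filter (pvHit mn mx v) ++ [i + 1]
           else l.filter (pvHit mn mx v))
          = (l ++ [i + 1]).filter (pvHit mn mx v) := by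
        intro l
        rw [List.filter_append]
        simp only [List.filter_cons, List.filter_nil]
        by_cases hp : pvHit mn mx v (i + 1) = true
        · rw [if_pos (hhit.mpr hp)]; simp [hp]
        · rw [if_neg (fun hc => hp (hhit.mp hc)), if_neg (by simpa using hp)]
          simp
      have hrng : (PySem.List.pyRange 1 (i + 1) 1) ++ [i + 1]
          = PySem.List.pyRange 1 (i + 1 + 1) 1 :=
        (PySem.List.pyRange_one_succ_right (by omega)).symm
      have hbrk : ((pvS v i.toNat + (v - i) > mx ∧ b = true) ∨ (pvS v i.toNat + (v - i) < mn ∧ b = false))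
          ↔ pvBrk mn mx b v (i + 1) = true := by
        rw [hx2]; unfold pvBrk; cases b <;> simp
      rw [PySem.List.pyRange_one_cons (by omega : i + 1 < pvN b v + 1)]
      by_cases hB : pvBrk mn mx b v (i + 1) = true
      · rw [List.find?_cons_of_pos hB]
        rw [if_pos (hbrk.mpr hB)]
        simp only [pvAOut]
        rw [if_pos trivial, hsr2, hrng]
      · rw [List.find?_cons_of_neg hB]
        rw [if_neg (fun hc => hB (hbrk.mp hc))]
        rw [hsr2, hrng, hx2]
        have harg : v - i - 1 = v - (i + 1) := by ring
        rw [harg, ← hstop]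
        exact ih (i + 1) (by omega) (by omega) (by omega)

lemma pvAVel_spec (mn mx : Int) (b : Bool) (v : Int) :
    pvAVel mn mx b v = pvASpec mn mx b v := by
  have h := pvAInner_run mn mx b v (pvN b v).toNat 0 (le_refl 0) (by omega) (by omega)
  unfold pvAVel pvASpec
  have h0 : v - (0:Int) = v := by ring
  rw [h0] at h
  have hsr0 : (PySem.List.pyRange 1 (0 + 1) 1).filter (pvHit mn mx v) = [] := by
    rw [PySem.List.pyRange_one_eq_nil (by omega)]; rfl
  rw [hsr0] at h
  have : pvS v (0:Int).toNat = 0 := rfl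
  rw [this] at h
  simpa using h

-- least-witness property of find? over an increasing range
lemma pvFind?_pyRange_some {a b : Int} {p : Int → Bool} {j : Int}
    (h : (PySem.List.pyRange a b 1).find? p = some j) :
    a ≤ j ∧ j < b ∧ p j = true ∧ ∀ k, a ≤ k → k < j → p k = false := by
  induction hn : (b - a).toNat generalizing a with
  | zero =>
    rw [PySem.List.pyRange_one_eq_nil (by omega)] at h
    simp at h
  | succ n ih =>
    rw [PySem.List.pyRange_one_cons (by omega : a < b)] at h
    by_cases hp : p a
    · rw [List.find?_cons_of_pos hp] at h
      obtain rfl : a = j := by simpa using h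
      exact ⟨le_refl _, by omega, hp, fun k hk1 hk2 => by omega⟩
    · rw [List.find?_cons_of_neg hp] at h
      obtain ⟨h1, h2, h3, h4⟩ := ih h (by omega)
      refine ⟨by omega, h2, h3, fun k hk1 hk2 => ?_⟩
      rcases eq_or_lt_of_le hk1 with rfl | hlt
      · simpa using hp
      · exact h4 k (by omega) hk2


-- ---------- record relations and helpers ----------

def pvOptRel {α β : Type} (R : α → β → Prop) : Option α → Option β → Prop
  | none, none => True
  | some a, some b => R a b
  | _, _ => False

-- x-side: A's step list vs B's interval record (lo, hi, settled)
def pvRX (sr : List Int) (r : Int × Int × Bool) : Prop :=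
  (∀ a : Int, a ∈ sr ↔ ((r.1 ≤ a ∧ a ≤ r.2.1) ∨ (r.2.2 = true ∧ a = -1))) ∧
  (r.2.2 = true → PySem.List.pyGet? sr (-1) = some (-1) ∧ PySem.List.pyGet? sr (-2) = some r.2.1) ∧
  (r.2.2 = false → ∃ z, PySem.List.pyGet? sr (-1) = some z ∧ 1 ≤ z) ∧
  1 ≤ r.1 ∧ r.1 ≤ r.2.1

-- y-side: A's step list vs B's record (step set, settled, max step)
def pvRY (sr : List Int) (r : PySem.Set Int × Bool × Int) : Prop :=
  (∀ a : Int, a ∈ sr ↔ (a ∈ r.1 ∨ (r.2.1 = true ∧ a = -1))) ∧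
  (r.2.1 = false → ∃ z, PySem.List.pyGet? sr (-1) = some z ∧ 1 ≤ z) ∧
  r.2.2 ∈ r.1 ∧ (∀ a ∈ r.1, 1 ≤ a ∧ a ≤ r.2.2)

lemma pvGet_append_two (l : List Int) (a c : Int) :
    PySem.List.pyGet? (l ++ [a, c]) (-2) = some a := by
  have h2 : (2:Nat) ≤ (l ++ [a, c]).length := by simp
  rw [PySem.List.pyGet?_neg_ofNat (l ++ [a, c]) 2 (by omega) h2]
  have : (l ++ [a, c]).length - 2 = l.length := by simp
  rw [this, List.getElem?_append_right (le_refl _)]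
  simp

lemma pvBMax_spec {s : List Int} (h : s ≠ []) :
    pvBMax s ∈ s ∧ ∀ a ∈ s, a ≤ pvBMax s := by
  obtain ⟨m, hm⟩ : ∃ m, PySem.List.max? s (fun a => a) = some m := by
    cases hh : PySem.List.max? s (fun a => a) with
    | none => rw [PySem.List.max?_eq_none_iff] at hh; exact absurd hh h
    | some m => exact ⟨m, rfl⟩
  have hmem := PySem.List.max?_mem hm
  have hmax := PySem.List.max?_isMax hm
  simp only [pvBMax, hm, Option.getD_some]
  exact ⟨hmem, hmax⟩

lemma pvHead_le {l : List Int} (hp : l.Pairwise (· < ·)) (hne : l ≠ []) {a : Int}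
    (ha : a ∈ l) : l.head hne ≤ a := by
  cases l with
  | nil => simp at hne
  | cons x t =>
    rcases List.mem_cons.mp ha with rfl | h
    · simp
    · simpa using le_of_lt ((List.pairwise_cons.mp hp).1 a h)

lemma pvLe_getLast {l : List Int} (hp : l.Pairwise (· < ·)) (hne : l ≠ []) {a : Int}
    (ha : a ∈ l) : a ≤ l.getLast hne := by
  have hsplit := List.dropLast_append_getLast hne
  have hp2 : (l.dropLast ++ [l.getLast hne]).Pairwise (· < ·) := by rw [hsplit]; exact hp
  have hpárts := List.pairwise_append.mp hp2
  rw [← hsplit] at ha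
  rcases List.mem_append.mp ha with h | h
  · exact le_of_lt (hpárts.2.2 a h _ (by simp))
  · simp at h; omega

-- a fold of Set.add over a duplicate-free list of fresh elements appends the list
lemma pvFoldlAdd_nodup : ∀ (l : List Int) (s : PySem.Set Int), l.Nodup → (∀ a ∈ l, a ∉ s) →
    l.foldl PySem.Set.add s = s ++ l := by
  intro l
  induction l with
  | nil => intro s _ _; simp
  | cons x t ih =>
    intro s hnd hfresh
    have h1 : PySem.Set.add s x = s ++ [x] :=
      PySem.Set.add_of_not_mem (hfresh x (by simp))
    simp only [List.foldl_cons, h1]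
    rw [ih (s ++ [x]) (by simp_all) ?_]
    · simp
    · intro a ha
      simp only [List.mem_append, List.mem_singleton]
      rintro (h | rfl)
      · exact hfresh a (by simp [ha]) h
      · exact (List.nodup_cons.mp hnd).1 ha

lemma pvS_mono' (v a c : Int) (h1 : 0 ≤ a) (h2 : a ≤ c) (h3 : c ≤ v + 1) :
    pvS v a.toNat ≤ pvS v c.toNat :=
  pvS_mono v (by omega) (by omega)

lemma pvS_concave' (v a c : Int) (h1 : 1 ≤ a) (h2 : a ≤ c) :
    min (pvS v 1) (pvS v c.toNat) ≤ pvS v a.toNat :=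
  pvS_concave v (by omega) (by omega)

lemma pvS_one (v : Int) : pvS v 1 = v := by simp [pvS]

lemma pvXnone (x0 x1 v : Int) (hv : v < 0) : pvAVel x0 x1 true v = none := by
  rw [pvAVel_spec]
  unfold pvASpec pvN
  rw [if_pos rfl]
  rw [(show PySem.List.pyRange 1 (v - -1 + 1) 1 = [] from PySem.List.pyRange_one_eq_nil (by omega))]
  simp only [List.find?_nil, List.filter_nil]
  simp

lemma pvXrel (x0 x1 v : Int) (hv : 0 ≤ v) :
    pvOptRel pvRX (pvAVel x0 x1 true v) (pvXInterval x0 x1 v) := by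
  rw [pvAVel_spec]
  have hN : pvN true v = v + 1 := by unfold pvN; simp
  have hBfilt : (PySem.List.pyRange 1 (v + 1 + 1) 1).filter
        (fun i => decide (x0 ≤ pvPos v (min i v) ∧ pvPos v (min i v) ≤ x1))
      = (PySem.List.pyRange 1 (v + 1 + 1) 1).filter (pvHit x0 x1 v) := by
    apply List.filter_congr
    intro i hi
    rw [PySem.List.mem_pyRange_one] at hi
    have hmin0 : 0 ≤ min i v := by omega
    have hps : pvPos v (min i v) = pvS v i.toNat := by
      rw [pvPos_eq v _ hmin0]
      by_cases hle : i ≤ v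
      · rw [min_eq_left hle]
      · have : i = v + 1 := by omega
        subst this
        rw [min_eq_right (by omega)]
        have h1 : (v + 1).toNat = v.toNat + 1 := by omega
        rw [h1, pvS_plateau v hv]
    rw [hps]
    unfold pvHit
    rfl
  set H := (PySem.List.pyRange 1 (v + 1 + 1) 1).filter (pvHit x0 x1 v) with hH
  have hBX : pvXInterval x0 x1 v = if h : H = [] then none
      else some (H.head h, H.getLast h, decide (x0 ≤ pvTri v ∧ pvTri v ≤ x1)) := by
    unfold pvXInterval
    simp only [hBfilt]
  have hpH : H.Pairwise (· < ·) :=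
    List.Pairwise.filter _ (PySem.List.pairwise_lt_pyRange_one 1 (v + 1 + 1))
  have hmemH : ∀ a : Int, a ∈ H ↔
      (1 ≤ a ∧ a < v + 2 ∧ x0 ≤ pvS v a.toNat ∧ pvS v a.toNat ≤ x1) := by
    intro a
    rw [hH, List.mem_filter, PySem.List.mem_pyRange_one]
    unfold pvHit
    simp
    omega
  have hTri : pvTri v = pvS v (v + 1).toNat := by
    rw [pvTri_eq v hv]
    have h1 : (v + 1).toNat = v.toNat + 1 := by omega
    rw [h1, pvS_plateau v hv]
  cases hfind : (PySem.List.pyRange 1 (v + 1 + 1) 1).find? (pvBrk x0 x1 true v) with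
  | none =>
    have hA : pvASpec x0 x1 true v
        = if (x0 ≤ pvS v (v + 1).toNat ∧ pvS v (v + 1).toNat ≤ x1) ∧ H ≠ []
          then some (H ++ [-1]) else none := by
      unfold pvASpec
      rw [hN, hfind]
    rw [hA]
    have hnob : ∀ k : Int, 1 ≤ k → k < v + 2 → pvS v k.toNat ≤ x1 := by
      intro k h1 h2
      have := List.find?_eq_none.mp hfind k (by rw [PySem.List.mem_pyRange_one]; omega)
      unfold pvBrk at this
      simp at this
      omega
    by_cases hE : H = []
    · rw [hBX, dif_pos hE, if_neg (by simp [hE])]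
      simp [pvOptRel]
    · have hband : x0 ≤ pvS v (v + 1).toNat ∧ pvS v (v + 1).toNat ≤ x1 := by
        obtain ⟨a, ha⟩ := List.exists_mem_of_ne_nil H hE
        obtain ⟨ha1, ha2, ha3, ha4⟩ := (hmemH a).mp ha
        constructor
        · exact le_trans ha3 (pvS_mono' v a (v + 1) (by omega) (by omega) (by omega))
        · exact hnob (v + 1) (by omega) (by omega)
      rw [hBX, dif_neg hE, if_pos ⟨hband, hE⟩]
      simp only [pvOptRel]
      have hsettle : decide (x0 ≤ pvTri v ∧ pvTri v ≤ x1) = true := by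
        rw [hTri]; simp [hband.1, hband.2]
      rw [hsettle]
      have hlastmem := List.getLast_mem hE
      have hheadmem := List.head_mem hE
      refine ⟨?_, fun _ => ⟨?_, ?_⟩, fun h => by simp at h, ?_, ?_⟩
      · intro a
        simp only [List.mem_append, List.mem_singleton]
        constructor
        · rintro (h | rfl)
          · exact Or.inl ⟨pvHead_le hpH hE h, pvLe_getLast hpH hE h⟩
          · exact Or.inr ⟨by trivial, rfl⟩
        · rintro (⟨hlo, hhi⟩ | ⟨-, rfl⟩)
          · left
            obtain ⟨hh1, hh2, hh3, hh4⟩ := (hmemH _).mp hheadmem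
            obtain ⟨hl1, hl2, hl3, hl4⟩ := (hmemH _).mp hlastmem
            refine (hmemH a).mpr ⟨by omega, by omega, ?_, ?_⟩
            · exact le_trans hh3 (pvS_mono' v _ a (by omega) hlo (by omega))
            · exact le_trans (pvS_mono' v a _ (by omega) hhi (by omega)) hl4
          · simp
      · exact PySem.List.pyGet?_neg_one_append_singleton ..
      · have hsplit : H.dropLast ++ [H.getLast hE] = H := List.dropLast_append_getLast hE
        calc PySem.List.pyGet? (H ++ [-1]) (-2)
            = PySem.List.pyGet? (H.dropLast ++ [H.getLast hE, -1]) (-2) := by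
              rw [show H.dropLast ++ [H.getLast hE, -1] = (H.dropLast ++ [H.getLast hE]) ++ [-1] by simp, hsplit]
          _ = some (H.getLast hE) := pvGet_append_two ..
      · exact ((hmemH _).mp hheadmem).1
      · exact pvLe_getLast hpH hE hheadmem
  | some j =>
    obtain ⟨hj1, hj2, hj3, hj4⟩ := pvFind?_pyRange_some hfind
    have hbrkj : x1 < pvS v j.toNat := by
      unfold pvBrk at hj3; simpa using hj3
    have hmin : ∀ k : Int, 1 ≤ k → k < j → pvS v k.toNat ≤ x1 := by
      intro k h1 h2
      have := hj4 k h1 h2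
      unfold pvBrk at this
      simp at this
      omega
    have htrunc : (PySem.List.pyRange 1 (j + 1) 1).filter (pvHit x0 x1 v) = H := by
      rw [hH, PySem.List.pyRange_one_append 1 (j + 1) (v + 1 + 1) (by omega) (by omega),
        List.filter_append]
      have hnil : (PySem.List.pyRange (j + 1) (v + 1 + 1) 1).filter (pvHit x0 x1 v) = [] := by
        apply List.filter_eq_nil_iff.mpr
        intro k hk
        rw [PySem.List.mem_pyRange_one] at hk
        unfold pvHit
        simp only [decide_eq_true_eq, not_and]
        intro hcon
        have : pvS v j.toNat ≤ pvS v k.toNat := pvS_mono' v j k (by omega) (by omega) (by omega)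
        omega
      rw [hnil, List.append_nil]
    have hA : pvASpec x0 x1 true v
        = if H ≠ [] then some (H ++ [j - 1]) else none := by
      unfold pvASpec
      rw [hN, hfind]
      change (if ((PySem.List.pyRange 1 (j + 1) 1).filter (pvHit x0 x1 v)) ≠ []
          then some ((PySem.List.pyRange 1 (j + 1) 1).filter (pvHit x0 x1 v) ++ [j - 1])
          else none) = _
      rw [htrunc]
    rw [hA]
    by_cases hE : H = []
    · rw [hBX, dif_pos hE, if_neg (by simp [hE])]
      simp [pvOptRel]
    · rw [hBX, dif_neg hE, if_pos hE]
      simp only [pvOptRel]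
      have hboundj : ∀ a ∈ H, a ≤ j - 1 := by
        intro a ha
        obtain ⟨ha1, ha2, ha3, ha4⟩ := (hmemH a).mp ha
        by_contra hcon
        have haj : j ≤ a := by omega
        have : pvS v j.toNat ≤ pvS v a.toNat := pvS_mono' v j a (by omega) haj (by omega)
        omega
      have hj2' : 2 ≤ j := by
        obtain ⟨a, ha⟩ := List.exists_mem_of_ne_nil H hE
        have := hboundj a ha
        have := ((hmemH a).mp ha).1
        omega
      have hjm1 : j - 1 ∈ H := by
        obtain ⟨a, ha⟩ := List.exists_mem_of_ne_nil H hE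
        obtain ⟨ha1, ha2, ha3, ha4⟩ := (hmemH a).mp ha
        refine (hmemH (j - 1)).mpr ⟨by omega, by omega, ?_, ?_⟩
        · exact le_trans ha3 (pvS_mono' v a (j - 1) (by omega) (hboundj a ha) (by omega))
        · exact hmin (j - 1) (by omega) (by omega)
      have hlast : H.getLast hE = j - 1 :=
        le_antisymm (hboundj _ (List.getLast_mem hE)) (pvLe_getLast hpH hE hjm1)
      have hsettle : decide (x0 ≤ pvTri v ∧ pvTri v ≤ x1) = false := by
        rw [hTri]
        have : pvS v j.toNat ≤ pvS v (v + 1).toNat :=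
          pvS_mono' v j (v + 1) (by omega) (by omega) (by omega)
        simp
        intro _
        omega
      rw [hsettle]
      have hheadmem := List.head_mem hE
      refine ⟨?_, fun h => by simp at h,
        fun _ => ⟨j - 1, PySem.List.pyGet?_neg_one_append_singleton .., by omega⟩, ?_, ?_⟩
      · intro a
        simp only [List.mem_append, List.mem_singleton]
        rw [hlast]
        constructor
        · rintro (h | rfl)
          · exact Or.inl ⟨pvHead_le hpH hE h, by rw [← hlast]; exact pvLe_getLast hpH hE h⟩
          · exact Or.inl ⟨by rw [← hlast]; exact pvHead_le hpH hE (List.getLast_mem hE), le_refl _⟩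
        · rintro (⟨hlo, hhi⟩ | ⟨hcon, -⟩)
          · left
            obtain ⟨hh1, hh2, hh3, hh4⟩ := (hmemH _).mp hheadmem
            refine (hmemH a).mpr ⟨by omega, by omega, ?_, ?_⟩
            · exact le_trans hh3 (pvS_mono' v _ a (by omega) hlo (by omega))
            · exact hmin a (by omega) (by omega)
          · simp at hcon
      · exact ((hmemH _).mp hheadmem).1
      · rw [hlast]
        exact hboundj _ hheadmem

lemma pvYnone (y0 y1 : Int) : pvAVel y0 y1 false (-1000) = none := by
  rw [pvAVel_spec]
  unfold pvASpec pvN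
  rw [if_neg (by simp)]
  rw [(show PySem.List.pyRange 1 ((-1000:Int) - -1000 + 1) 1 = []
        from PySem.List.pyRange_one_eq_nil (by omega))]
  simp only [List.find?_nil, List.filter_nil]
  simp

lemma pvYrel (y0 y1 v : Int) (hv : -999 ≤ v) :
    pvOptRel pvRY (pvAVel y0 y1 false v) (pvYRecord y0 y1 v) := by
  rw [pvAVel_spec]
  have hN : pvN false v = v + 1000 := by unfold pvN; simp
  have hN1 : 1 ≤ v + 1000 := by omega
  set H := (PySem.List.pyRange 1 (v + 1000 + 1) 1).filter (pvHit y0 y1 v) with hH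
  have hpH : H.Pairwise (· < ·) :=
    List.Pairwise.filter _ (PySem.List.pairwise_lt_pyRange_one 1 (v + 1000 + 1))
  have hmemH : ∀ a : Int, a ∈ H ↔
      (1 ≤ a ∧ a < v + 1000 + 1 ∧ y0 ≤ pvS v a.toNat ∧ pvS v a.toNat ≤ y1) := by
    intro a
    rw [hH, List.mem_filter, PySem.List.mem_pyRange_one]
    unfold pvHit
    simp
    omega
  have hPos1 : pvS v 1 = v := pvS_one v
  have hfold : ∀ (q : Int → Prop) [DecidablePred q],
      (PySem.List.pyRange 1 (v + 1000 + 1) 1).foldl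
        (fun s i => if q i then PySem.Set.add s i else s) (PySem.Set.empty : PySem.Set Int)
      = (PySem.List.pyRange 1 (v + 1000 + 1) 1).filter (fun i => decide (q i)) := by
    intro q _
    rw [PySem.List.foldl_ite_eq_foldl_filter]
    rw [pvFoldlAdd_nodup _ _ ?_ (by intro a _ h; simp [PySem.Set.empty] at h)]
    · simp [PySem.Set.empty]
    · exact ((PySem.List.pairwise_lt_pyRange_one 1 (v + 1000 + 1)).filter _).imp
        (fun h => ne_of_lt h)
  by_cases hup : y0 ≤ v
  · -- the probe starts at or above the band floor
    have hsteps : (PySem.List.pyRange 1 (v + 1000 + 1) 1).foldl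
        (fun s i => if (y0 ≤ pvPos v i ∧ pvPos v i ≤ y1) ∧ (i = 1 ∨ decide (y0 ≤ v) = true)
                    then PySem.Set.add s i else s) (PySem.Set.empty : PySem.Set Int) = H := by
      rw [hfold]
      apply List.filter_congr
      intro i hi
      rw [PySem.List.mem_pyRange_one] at hi
      have : pvPos v i = pvS v i.toNat := pvPos_eq v i (by omega)
      rw [this]
      unfold pvHit
      simp [hup]
    have hB : pvYRecord y0 y1 v
        = if H = [] then none
          else if decide (y0 ≤ v) = true ∧ y0 ≤ pvPos v (v + 1000) then
            if pvPos v (v + 1000) ≤ y1 then some (H, true, pvBMax H) else none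
          else
            some (PySem.Set.add H (pvBMax ((PySem.List.pyRange 1 (v + 1000 + 1) 1).filter
                    (fun i => decide (y0 ≤ pvPos v i)))), false,
              pvBMax (PySem.Set.add H (pvBMax ((PySem.List.pyRange 1 (v + 1000 + 1) 1).filter
                    (fun i => decide (y0 ≤ pvPos v i)))))) := by
      simp only [pvYRecord]
      rw [hsteps]
    have hPosN : pvPos v (v + 1000) = pvS v (v + 1000).toNat := pvPos_eq v _ (by omega)
    cases hfind : (PySem.List.pyRange 1 (v + 1000 + 1) 1).find? (pvBrk y0 y1 false v) with
    | none =>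
      have hA : pvASpec y0 y1 false v
          = if (y0 ≤ pvS v (v + 1000).toNat ∧ pvS v (v + 1000).toNat ≤ y1) ∧ H ≠ []
            then some (H ++ [-1]) else none := by
        unfold pvASpec
        rw [hN, hfind]
      have hnob : ∀ k : Int, 1 ≤ k → k < v + 1000 + 1 → y0 ≤ pvS v k.toNat := by
        intro k h1 h2
        have := List.find?_eq_none.mp hfind k (by rw [PySem.List.mem_pyRange_one]; omega)
        unfold pvBrk at this
        simp at this
        omega
      by_cases hE : H = []
      · have hA2 : pvASpec y0 y1 false v = none := by rw [hA, if_neg (by simp [hE])]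
        have hB2 : pvYRecord y0 y1 v = none := by rw [hB, if_pos hE]
        rw [hA2, hB2]
        simp [pvOptRel]
      · have hsN : y0 ≤ pvS v (v + 1000).toNat := hnob (v + 1000) (by omega) (by omega)
        by_cases hy1 : pvS v (v + 1000).toNat ≤ y1
        · have hA2 : pvASpec y0 y1 false v = some (H ++ [-1]) := by
            rw [hA, if_pos ⟨⟨hsN, hy1⟩, hE⟩]
          have hB2 : pvYRecord y0 y1 v = some (H, true, pvBMax H) := by
            rw [hB, if_neg hE, if_pos ⟨by simp [hup], by rw [hPosN]; exact hsN⟩,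
              if_pos (by rw [hPosN]; exact hy1)]
          rw [hA2, hB2]
          simp only [pvOptRel]
          obtain ⟨hM1, hM2⟩ := pvBMax_spec hE
          refine ⟨?_, fun h => by simp at h, hM1, fun a ha => ⟨((hmemH a).mp ha).1, hM2 a ha⟩⟩
          intro a
          simp only [List.mem_append, List.mem_singleton]
          constructor
          · rintro (h | rfl)
            · exact Or.inl h
            · exact Or.inr ⟨by trivial, rfl⟩
          · rintro (h | ⟨-, rfl⟩)
            · exact Or.inl h
            · simp
        · have hA2 : pvASpec y0 y1 false v = none := by
            rw [hA, if_neg (by rw [not_and_or]; left; omega)]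
          have hB2 : pvYRecord y0 y1 v = none := by
            rw [hB, if_neg hE, if_pos ⟨by simp [hup], by rw [hPosN]; exact hsN⟩,
              if_neg (by rw [hPosN]; exact hy1)]
          rw [hA2, hB2]
          simp [pvOptRel]
    | some j =>
      obtain ⟨hj1, hj2, hj3, hj4⟩ := pvFind?_pyRange_some hfind
      have hbrkj : pvS v j.toNat < y0 := by
        unfold pvBrk at hj3; simpa using hj3
      have hmin : ∀ k : Int, 1 ≤ k → k < j → y0 ≤ pvS v k.toNat := by
        intro k h1 h2
        have := hj4 k h1 h2
        unfold pvBrk at this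
        simp at this
        omega
      have hj2' : 2 ≤ j := by
        rcases eq_or_lt_of_le hj1 with rfl | h
        · rw [(show (1:Int).toNat = 1 from rfl), hPos1] at hbrkj; omega
        · omega
      have hfall : ∀ k : Int, j ≤ k → pvS v k.toNat < y0 := by
        intro k hk
        by_contra hcon
        have hcc := pvS_concave' v j k hj1 hk
        rw [hPos1] at hcc
        omega
      have htrunc : (PySem.List.pyRange 1 (j + 1) 1).filter (pvHit y0 y1 v) = H := by
        rw [hH, PySem.List.pyRange_one_append 1 (j + 1) (v + 1000 + 1) (by omega) (by omega),
          List.filter_append]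
        have hnil : (PySem.List.pyRange (j + 1) (v + 1000 + 1) 1).filter (pvHit y0 y1 v) = [] := by
          apply List.filter_eq_nil_iff.mpr
          intro k hk
          rw [PySem.List.mem_pyRange_one] at hk
          unfold pvHit
          simp only [decide_eq_true_eq, not_and]
          intro hcon
          have := hfall k (by omega)
          omega
        rw [hnil, List.append_nil]
      have hA : pvASpec y0 y1 false v
          = if H ≠ [] then some (H ++ [j - 1]) else none := by
        unfold pvASpec
        rw [hN, hfind]
        change (if ((PySem.List.pyRange 1 (j + 1) 1).filter (pvHit y0 y1 v)) ≠ []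
            then some ((PySem.List.pyRange 1 (j + 1) 1).filter (pvHit y0 y1 v) ++ [j - 1])
            else none) = _
        rw [htrunc]
      set Q := (PySem.List.pyRange 1 (v + 1000 + 1) 1).filter
          (fun i => decide (y0 ≤ pvPos v i)) with hQ
      have hmemQ : ∀ a : Int, a ∈ Q ↔ (1 ≤ a ∧ a < v + 1000 + 1 ∧ y0 ≤ pvS v a.toNat) := by
        intro a
        rw [hQ, List.mem_filter, PySem.List.mem_pyRange_one]
        constructor
        · rintro ⟨h1, h2⟩
          rw [pvPos_eq v a (by omega)] at h2
          simp at h2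
          exact ⟨by omega, by omega, h2⟩
        · rintro ⟨h1, h2, h3⟩
          refine ⟨by omega, ?_⟩
          rw [pvPos_eq v a (by omega)]
          simpa using h3
      have hQne : Q ≠ [] := by
        have : (1:Int) ∈ Q := (hmemQ 1).mpr ⟨le_refl _, by omega,
          by rw [(show (1:Int).toNat = 1 from rfl), hPos1]; exact hup⟩
        exact List.ne_nil_of_mem this
      obtain ⟨hQ1, hQ2⟩ := pvBMax_spec hQne
      have hQub : ∀ a ∈ Q, a ≤ j - 1 := by
        intro a ha
        obtain ⟨h1, h2, h3⟩ := (hmemQ a).mp ha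
        by_contra hcon
        have := hfall a (by omega)
        omega
      have hjm1Q : j - 1 ∈ Q := (hmemQ (j - 1)).mpr ⟨by omega, by omega,
        hmin (j - 1) (by omega) (by omega)⟩
      have hm : pvBMax Q = j - 1 := le_antisymm (hQub _ hQ1) (hQ2 _ hjm1Q)
      by_cases hE : H = []
      · have hA2 : pvASpec y0 y1 false v = none := by rw [hA, if_neg (by simp [hE])]
        have hB2 : pvYRecord y0 y1 v = none := by rw [hB, if_pos hE]
        rw [hA2, hB2]
        simp [pvOptRel]
      · have hA2 : pvASpec y0 y1 false v = some (H ++ [j - 1]) := by rw [hA, if_pos hE]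
        have hB2 : pvYRecord y0 y1 v
            = some (PySem.Set.add H (j - 1), false, pvBMax (PySem.Set.add H (j - 1))) := by
          rw [hB, if_neg hE, if_neg (by
            rw [not_and_or]
            right
            rw [hPosN]
            have := hfall (v + 1000) (by omega)
            omega), hm]
        rw [hA2, hB2]
        simp only [pvOptRel]
        have hSne : (PySem.Set.add H (j - 1) : List Int) ≠ [] :=
          List.ne_nil_of_mem ((PySem.Set.mem_add H (j - 1) (j - 1)).mpr (Or.inr rfl))
        obtain ⟨hM1, hM2⟩ := pvBMax_spec hSne
        refine ⟨?_, fun _ => ⟨j - 1, PySem.List.pyGet?_neg_one_append_singleton .., by omega⟩,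
          hM1, fun a ha => ⟨?_, hM2 a ha⟩⟩
        · intro a
          simp only [List.mem_append, List.mem_singleton]
          rw [PySem.Set.mem_add]
          constructor
          · rintro (h | rfl)
            · exact Or.inl (Or.inl h)
            · exact Or.inl (Or.inr rfl)
          · rintro ((h | rfl) | ⟨hcon, -⟩)
            · exact Or.inl h
            · exact Or.inr rfl
            · simp at hcon
        · rcases (PySem.Set.mem_add H (j - 1) a).mp ha with h | rfl
          · exact ((hmemH a).mp h).1
          · omega
  · -- the probe starts below the band floor: it breaks at step 1 with no hits
    have hsteps : (PySem.List.pyRange 1 (v + 1000 + 1) 1).foldl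
        (fun s i => if (y0 ≤ pvPos v i ∧ pvPos v i ≤ y1) ∧ (i = 1 ∨ decide (y0 ≤ v) = true)
                    then PySem.Set.add s i else s) (PySem.Set.empty : PySem.Set Int) = [] := by
      rw [hfold]
      apply List.filter_eq_nil_iff.mpr
      intro k hk
      rw [PySem.List.mem_pyRange_one] at hk
      simp only [decide_eq_true_eq, not_and]
      rintro ⟨hband1, hband2⟩ (rfl | hcon)
      · rw [pvPos_eq v 1 (by omega), (show (1:Int).toNat = 1 from rfl), hPos1] at hband1
        omega
      · omega
    have hB : pvYRecord y0 y1 v = none := by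
      simp only [pvYRecord]
      rw [hsteps]
      simp
    have hbrk1 : pvBrk y0 y1 false v 1 = true := by
      unfold pvBrk
      rw [if_neg (by simp)]
      rw [(show (1:Int).toNat = 1 from rfl), hPos1]
      simp
      omega
    have hfind : (PySem.List.pyRange 1 (v + 1000 + 1) 1).find? (pvBrk y0 y1 false v) = some 1 := by
      rw [PySem.List.pyRange_one_cons (by omega), List.find?_cons_of_pos hbrk1]
    have hA : pvASpec y0 y1 false v = none := by
      unfold pvASpec
      rw [hN, hfind]
      change (if ((PySem.List.pyRange 1 ((1:Int) + 1) 1).filter (pvHit y0 y1 v)) ≠ []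
          then some ((PySem.List.pyRange 1 ((1:Int) + 1) 1).filter (pvHit y0 y1 v) ++ [(1:Int) - 1])
          else none) = _
      rw [PySem.List.pyRange_one_singleton 1]
      have hh : (pvHit y0 y1 v 1) = false := by
        unfold pvHit
        rw [(show (1:Int).toNat = 1 from rfl), hPos1]
        simp
        omega
      simp [List.filter, hh]
    rw [hA, hB]
    simp [pvOptRel]

-- ---------- list-level plumbing ----------

lemma pvFoldlOpt {α : Type} (f : Int → Option α) (l : List Int) (acc : List (Int × α)) :
    l.foldl (fun acc v => acc ++ ((f v).map (fun r => (v, r))).toList) acc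
    = acc ++ l.filterMap (fun v => (f v).map (fun r => (v, r))) := by
  induction l generalizing acc with
  | nil => simp
  | cons x t ih =>
    simp only [List.foldl_cons, List.filterMap_cons]
    cases hf : f x
    · simp [ih]
    · simp [ih]
  
lemma pvForall₂FilterMap {α β : Type} (R : α → β → Prop) (f : Int → Option α) (g : Int → Option β)
    (l : List Int) (h : ∀ v ∈ l, pvOptRel R (f v) (g v)) :
    List.Forall₂ (fun p q => p.1 = q.1 ∧ R p.2 q.2)
      (l.filterMap (fun v => (f v).map (fun r => (v, r))))
      (l.filterMap (fun v => (g v).map (fun r => (v, r)))) := by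
  induction l with
  | nil => simp
  | cons x t ih =>
    simp only [List.filterMap_cons]
    have hx := h x (by simp)
    have ht := ih (fun v hv => h v (by simp [hv]))
    cases hf : f x <;> cases hg : g x <;> rw [hf, hg] at hx
    · exact ht
    · exact absurd hx (by simp [pvOptRel])
    · exact absurd hx (by simp [pvOptRel])
    · simp only [Option.map_some]
      exact List.Forall₂.cons ⟨rfl, hx⟩ ht

lemma pvForall₂_mem_right {α β : Type} {R : α → β → Prop} {l1 : List α} {l2 : List β}
    (h : List.Forall₂ R l1 l2) : ∀ q ∈ l2, ∃ p ∈ l1, R p q := by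
  induction h with
  | nil => simp
  | cons hr _ ih =>
    intro q hq
    rcases List.mem_cons.mp hq with rfl | hq'
    · exact ⟨_, by simp, hr⟩
    · obtain ⟨p, hp, hpq⟩ := ih q hq'
      exact ⟨p, by simp [hp], hpq⟩

lemma pvPairwiseFilterMap {α : Type} (f : Int → Option α) {l : List Int}
    (hp : l.Pairwise (· < ·)) :
    (l.filterMap (fun v => (f v).map (fun r => (v, r)))).Pairwise (fun p q => p.1 < q.1) := by
  induction l with
  | nil => simp
  | cons x t ih =>
    obtain ⟨hx, ht⟩ := List.pairwise_cons.mp hp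
    simp only [List.filterMap_cons]
    cases hf : f x
    · exact ih ht
    · refine List.pairwise_cons.mpr ⟨?_, ih ht⟩
      intro q hq
      obtain ⟨v, hv, hv2⟩ := List.mem_filterMap.mp hq
      cases hg : f v <;> rw [hg] at hv2
      · simp at hv2
      · simp at hv2
        obtain ⟨rfl, -⟩ := hv2
        exact hx v hv

lemma pvFilter_beq_nodup {l : List Int} (h : l.Nodup) (s : Int) :
    l.filter (fun a => a == s) = if s ∈ l then [s] else [] := by
  induction l with
  | nil => simp
  | cons x t ih =>
    obtain ⟨hx, ht⟩ := List.nodup_cons.mp h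
    simp only [List.filter_cons]
    by_cases hxs : x = s
    · subst hxs
      rw [if_pos (by simp), ih ht, if_neg hx]
      simp
    · rw [if_neg (by simpa using hxs), ih ht]
      by_cases hst : s ∈ t
      · rw [if_pos hst, if_pos (by simp [hst])]
      · rw [if_neg hst, if_neg (by simp [hst, Ne.symm hxs])]

lemma pvFoldUpdate_mem (l : List Int) (g : Int → List Int) (init : PySem.Set Int) (a : Int) :
    a ∈ l.foldl (fun cs s => PySem.Set.update cs (g s)) init ↔ a ∈ init ∨ ∃ s ∈ l, a ∈ g s := by
  induction l generalizing init with
  | nil => simp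
  | cons x t ih =>
    simp only [List.foldl_cons]
    rw [ih, PySem.Set.mem_update]
    simp only [List.mem_cons]
    constructor
    · rintro ((h | h) | ⟨s, hs, ha⟩)
      · exact Or.inl h
      · exact Or.inr ⟨x, Or.inl rfl, h⟩
      · exact Or.inr ⟨s, Or.inr hs, ha⟩
    · rintro (h | ⟨s, rfl | hs, ha⟩)
      · exact Or.inl (Or.inl h)
      · exact Or.inl (Or.inr ha)
      · exact Or.inr ⟨s, hs, ha⟩

lemma pvFoldUpdate_nodup (l : List Int) (g : Int → List Int) (init : PySem.Set Int)
    (h : init.Nodup) : (l.foldl (fun cs s => PySem.Set.update cs (g s)) init).Nodup := by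
  induction l generalizing init with
  | nil => exact h
  | cons x t ih =>
    simp only [List.foldl_cons]
    exact ih _ (PySem.Set.nodup_update _ _ h)

lemma pvYRecord_nodup (y0 y1 v : Int) {r : PySem.Set Int × Bool × Int}
    (h : pvYRecord y0 y1 v = some r) : r.1.Nodup := by
  have hof : ((PySem.List.pyRange 1 (v + 1000 + 1) 1).foldl
      (fun s i => if (y0 ≤ pvPos v i ∧ pvPos v i ≤ y1) ∧ (i = 1 ∨ decide (y0 ≤ v) = true)
                  then PySem.Set.add s i else s)
      (PySem.Set.empty : PySem.Set Int)).Nodup := by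
    rw [PySem.List.foldl_ite_eq_foldl_filter]
    rw [show (PySem.Set.empty : PySem.Set Int) = [] from rfl, ← PySem.Set.ofList_eq_foldl]
    exact PySem.Set.nodup_ofList _
  simp only [pvYRecord] at h
  split_ifs at h with h1 h2 h3
  all_goals cases h
  all_goals first
    | exact hof
    | exact PySem.Set.nodup_add _ hof
    | exact PySem.Set.nodup_add _ _ hof

lemma pvYrecNone1000 (y0 y1 : Int) : pvYRecord y0 y1 (-1000) = none := by
  simp only [pvYRecord]
  rw [(show PySem.List.pyRange 1 ((-1000:Int) + 1000 + 1) 1 = []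
    from PySem.List.pyRange_one_eq_nil (by omega))]
  simp

-- ---------- spec lists and the bucket index ----------

def pvXspec (x0 x1 : Int) : List (Int × Int × Int × Bool) :=
  (PySem.List.pyRange 0 1000 1).filterMap (fun v => (pvXInterval x0 x1 v).map (fun r => (v, r)))

def pvYspec (y0 y1 : Int) : List (Int × PySem.Set Int × Bool × Int) :=
  (PySem.List.pyRange (-1000) 1000 1).filterMap (fun v => (pvYRecord y0 y1 v).map (fun r => (v, r)))

lemma pvYPhase_fold (y0 y1 : Int) : ∀ (l : List Int) (acc : List (Int × Bool × Int))
    (d : PySem.Dict Int (List Int)),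
    l.foldl (fun p vy => (pvYRecord y0 y1 vy).elim p (fun r =>
          (p.1 ++ [(vy, r.2.1, r.2.2)],
           r.1.foldl (fun d s => PySem.Dict.modify d s [] (fun l => l ++ [vy])) p.2))) (acc, d)
    = (acc ++ (l.filterMap (fun v => (pvYRecord y0 y1 v).map (fun r => (v, r)))).map
          (fun q => (q.1, q.2.2.1, q.2.2.2)),
       (l.filterMap (fun v => (pvYRecord y0 y1 v).map (fun r => (v, r)))).foldl
          (fun d q => q.2.1.foldl (fun d s => PySem.Dict.modify d s [] (fun l => l ++ [q.1])) d) d) := by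
  intro l
  induction l with
  | nil => intro acc d; simp
  | cons x t ih =>
    intro acc d
    simp only [List.foldl_cons, List.filterMap_cons]
    cases hr : pvYRecord y0 y1 x with
    | none => simp [ih]
    | some r =>
      simp only [List.foldl_cons, Option.elim_some, Option.map_some, List.map_cons]
      rw [ih]
      simp

lemma pvBucket_getD (s : Int) : ∀ (recs : List (Int × PySem.Set Int × Bool × Int))
    (d : PySem.Dict Int (List Int)), (∀ q ∈ recs, q.2.1.Nodup) →
    (recs.foldl (fun d q => q.2.1.foldl
        (fun d s' => PySem.Dict.modify d s' [] (fun l => l ++ [q.1])) d) d).getD s []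
    = d.getD s [] ++ (recs.filter (fun q => q.2.1.contains s)).map (fun q => q.1) := by
  intro recs
  induction recs with
  | nil => intro d _; simp
  | cons q t ih =>
    intro d hnd
    simp only [List.foldl_cons, List.filter_cons]
    rw [ih _ (fun p hp => hnd p (by simp [hp]))]
    have hinner : (q.2.1.foldl
        (fun d s' => PySem.Dict.modify d s' [] (fun l => l ++ [q.1])) d).getD s []
        = d.getD s [] ++ (if q.2.1.contains s then [q.1] else []) := by
      have hmap : q.2.1.foldl (fun d s' => PySem.Dict.modify d s' [] (fun l => l ++ [q.1])) d
          = ((q.2.1.map (fun s' => (s', q.1))).foldl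
              (fun d p => PySem.Dict.modify d p.1 [] (fun l => l ++ [p.2])) d) := by
        rw [List.foldl_map]
      rw [hmap, PySem.Dict.getD_foldl_modify_append]
      congr 1
      rw [List.filter_map]
      have : (q.2.1.filter ((fun p => p.1 == s) ∘ (fun s' => (s', q.1))))
          = q.2.1.filter (fun a => a == s) := by
        apply List.filter_congr
        intro a _
        simp
      rw [this, pvFilter_beq_nodup (hnd q (by simp)) s]
      by_cases hm : s ∈ q.2.1
      · rw [if_pos hm, if_pos ((PySem.Set.contains_iff _ _).mpr hm)]
        simp
      · rw [if_neg hm, if_neg (fun hc => hm ((PySem.Set.contains_iff _ _).mp hc))]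
        simp
    rw [hinner]
    by_cases hc : q.2.1.contains s = true
    · rw [if_pos hc, if_pos hc]
      simp
    · rw [if_neg hc, if_neg hc]
      simp

-- ---------- the canonical pair condition ----------

def pvCond (rx : Int × Int × Bool) (ry : PySem.Set Int × Bool × Int) : Bool :=
  (ry.1.any (fun s => decide (rx.1 ≤ s ∧ s ≤ rx.2.1))) ||
    (rx.2.2 && (ry.2.1 || decide (rx.1 ≤ ry.2.2)))

lemma pvPairCond_eq {srx sry : List Int} {rx : Int × Int × Bool}
    {ry : PySem.Set Int × Bool × Int} (hx : pvRX srx rx) (hy : pvRY sry ry) :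
    pvAPairCond srx sry = pvCond rx ry := by
  obtain ⟨hmx, hsx, hnx, hlo1, hlohi⟩ := hx
  obtain ⟨hmy, hny, hmyS, hbS⟩ := hy
  have hmy1 : 1 ≤ ry.2.2 := (hbS _ hmyS).1
  have hA1 : (srx.any fun a => sry.contains a) = true ↔
      ((∃ s ∈ ry.1, rx.1 ≤ s ∧ s ≤ rx.2.1) ∨ (rx.2.2 = true ∧ ry.2.1 = true)) := by
    simp only [List.any_eq_true, List.contains_iff_mem]
    constructor
    · rintro ⟨a, ha, hc⟩
      rcases (hmx a).mp ha with h1 | ⟨hst1, rfl⟩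
      · rcases (hmy a).mp hc with h2 | ⟨hst2, rfl⟩
        · exact Or.inl ⟨a, h2, h1⟩
        · omega
      · rcases (hmy (-1)).mp hc with h2 | ⟨hst2, -⟩
        · have := (hbS _ h2).1; omega
        · exact Or.inr ⟨hst1, hst2⟩
    · rintro (⟨s, h2, h1⟩ | ⟨hst1, hst2⟩)
      · exact ⟨s, (hmx s).mpr (Or.inl h1), (hmy s).mpr (Or.inl h2)⟩
      · exact ⟨-1, (hmx _).mpr (Or.inr ⟨hst1, rfl⟩), (hmy _).mpr (Or.inr ⟨hst2, rfl⟩)⟩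
  have hA2 : ((PySem.List.pyGet? srx (-1) == some (-1)) &&
      (PySem.List.pyGet? srx (-2)).elim false (fun thr => sry.any fun a => decide (a ≥ thr))) = true ↔
      (rx.2.2 = true ∧ ∃ s ∈ ry.1, rx.2.1 ≤ s) := by
    by_cases hst : rx.2.2 = true
    · obtain ⟨e1, e2⟩ := hsx hst
      rw [e1, e2]
      simp only [Option.elim, beq_self_eq_true, Bool.true_and, List.any_eq_true,
        decide_eq_true_eq, hst, true_and, ge_iff_le]
      constructor
      · rintro ⟨a, ha, hge⟩
        rcases (hmy a).mp ha with h2 | ⟨-, rfl⟩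
        · exact ⟨a, h2, hge⟩
        · omega
      · rintro ⟨s, hs, hge⟩
        exact ⟨s, (hmy s).mpr (Or.inl hs), hge⟩
    · have hst' : rx.2.2 = false := by revert hst; cases rx.2.2 <;> simp
      obtain ⟨z, e1, hz⟩ := hnx hst'
      rw [e1]
      simp only [hst', Bool.false_eq_true, false_and, iff_false, Bool.and_eq_true, beq_iff_eq,
        Option.some.injEq, not_and]
      intro hcon
      omega
  have hB : pvCond rx ry = true ↔
      ((∃ s ∈ ry.1, rx.1 ≤ s ∧ s ≤ rx.2.1) ∨ (rx.2.2 = true ∧ (ry.2.1 = true ∨ rx.1 ≤ ry.2.2))) := by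
    simp only [pvCond, Bool.or_eq_true, Bool.and_eq_true, List.any_eq_true, decide_eq_true_eq]
  rw [Bool.eq_iff_iff]
  simp only [pvAPairCond, Bool.or_eq_true]
  rw [hA1, hA2, hB]
  constructor
  · rintro ((hP | ⟨h1, h2⟩) | ⟨h1, s, hs, h2⟩)
    · exact Or.inl hP
    · exact Or.inr ⟨h1, Or.inl h2⟩
    · have := (hbS s hs).2
      exact Or.inr ⟨h1, Or.inr (by omega)⟩
  · rintro (hP | ⟨h1, h2 | h2⟩)
    · exact Or.inl (Or.inl hP)
    · exact Or.inl (Or.inr ⟨h1, h2⟩)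
    · by_cases hhi : rx.2.1 ≤ ry.2.2
      · exact Or.inr ⟨h1, ry.2.2, hmyS, hhi⟩
      · exact Or.inl (Or.inl ⟨ry.2.2, hmyS, h2, by omega⟩)

-- ---------- assembling the two programs ----------

lemma pvAx_eq (x0 x1 : Int) : get_potential_velocities x0 x1 true
    = (PySem.List.pyRange 0 1000 1).filterMap
        (fun v => (pvAVel x0 x1 true v).map (fun r => (v, r))) := by
  unfold get_potential_velocities
  refine Eq.trans (PySem.List.foldl_congr_mem
    (g := fun acc v => acc ++ ((pvAVel x0 x1 true v).map (fun r => (v, r))).toList) _ _ _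
    (by intro acc v _; cases hv : pvAVel x0 x1 true v <;> simp [hv])) ?_
  rw [pvFoldlOpt]
  rw [PySem.List.pyRange_one_append (-1000) 0 1000 (by omega) (by omega), List.filterMap_append]
  have h0 : (PySem.List.pyRange (-1000) 0 1).filterMap
      (fun v => (pvAVel x0 x1 true v).map (fun r => (v, r))) = [] := by
    apply List.filterMap_eq_nil_iff.mpr
    intro v hv
    rw [PySem.List.mem_pyRange_one] at hv
    rw [pvXnone x0 x1 v (by omega)]
    rfl
  rw [h0]
  simp

lemma pvAy_eq (y0 y1 : Int) : get_potential_velocities y0 y1 false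
    = (PySem.List.pyRange (-1000) 1000 1).filterMap
        (fun v => (pvAVel y0 y1 false v).map (fun r => (v, r))) := by
  unfold get_potential_velocities
  refine Eq.trans (PySem.List.foldl_congr_mem
    (g := fun acc v => acc ++ ((pvAVel y0 y1 false v).map (fun r => (v, r))).toList) _ _ _
    (by intro acc v _; cases hv : pvAVel y0 y1 false v <;> simp [hv])) ?_
  rw [pvFoldlOpt]
  simp

lemma pvFx (x0 x1 : Int) : List.Forall₂ (fun p q => p.1 = q.1 ∧ pvRX p.2 q.2)
    (get_potential_velocities x0 x1 true) (pvXspec x0 x1) := by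
  rw [pvAx_eq]
  unfold pvXspec
  apply pvForall₂FilterMap
  intro v hv
  rw [PySem.List.mem_pyRange_one] at hv
  exact pvXrel x0 x1 v (by omega)

lemma pvFy (y0 y1 : Int) : List.Forall₂ (fun p q => p.1 = q.1 ∧ pvRY p.2 q.2)
    (get_potential_velocities y0 y1 false) (pvYspec y0 y1) := by
  rw [pvAy_eq]
  unfold pvYspec
  apply pvForall₂FilterMap
  intro v hv
  rw [PySem.List.mem_pyRange_one] at hv
  by_cases hm : v = -1000
  · subst hm
    rw [pvYnone, pvYrecNone1000]
    trivial
  · exact pvYrel y0 y1 v (by omega)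

lemma pvYPhase_eq (y0 y1 : Int) : pvYPhase y0 y1
    = ((pvYspec y0 y1).map (fun q => (q.1, q.2.2.1, q.2.2.2)),
       (pvYspec y0 y1).foldl
          (fun d q => q.2.1.foldl
            (fun d s => PySem.Dict.modify d s [] (fun l => l ++ [q.1])) d)
          PySem.Dict.empty) := by
  unfold pvYPhase pvYspec
  refine Eq.trans (PySem.List.foldl_congr_mem
    (g := fun p vy => (pvYRecord y0 y1 vy).elim p (fun r =>
        (p.1 ++ [(vy, r.2.1, r.2.2)],
         r.1.foldl (fun d s => PySem.Dict.modify d s [] (fun l => l ++ [vy])) p.2))) _ _ _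
    (by intro p vy _; cases hv : pvYRecord y0 y1 vy <;> simp [hv])) ?_
  rw [pvYPhase_fold y0 y1 _ [] PySem.Dict.empty]
  simp

-- A as a flatMap of filters
lemma pvA_flat (x0 x1 y0 y1 : Int) : get_potential_velocity_pairs x0 x1 y0 y1
    = (get_potential_velocities x0 x1 true).flatMap
        (fun p => ((get_potential_velocities y0 y1 false).filter
            (fun q => pvAPairCond p.2 q.2)).map (fun q => (p.1, q.1))) := by
  unfold get_potential_velocity_pairs
  dsimp only
  refine Eq.trans (PySem.List.foldl_congr_mem
    (g := fun acc p => acc ++ ((get_potential_velocities y0 y1 false).filter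
        (fun q => pvAPairCond p.2 q.2)).map (fun q => (p.1, q.1))) _ _ _
    (by intro acc p _; rw [PySem.List.foldl_append_if])) ?_
  rw [PySem.List.foldl_append_eq_flatMap]
  simp

-- B as a flatMap of candidate lists
set_option maxRecDepth 8000 in
lemma pvB_flat (x0 x1 y0 y1 : Int) : get_potential_velocity_pairs_alt x0 x1 y0 y1
    = (pvXspec x0 x1).flatMap (fun q =>
        (if q.2.2.2 = true then
          (((pvYspec y0 y1).map (fun w => (w.1, w.2.2.1, w.2.2.2))).filter
              (fun w => w.2.1 || decide (q.2.1 ≤ w.2.2))).map (fun w => w.1)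
        else
          PySem.List.sorted
            ((PySem.List.pyRange q.2.1 (q.2.2.1 + 1) 1).foldl
              (fun cs s => PySem.Set.update cs (PySem.Dict.getD
                ((pvYspec y0 y1).foldl
                  (fun d w => w.2.1.foldl
                    (fun d s' => PySem.Dict.modify d s' [] (fun l => l ++ [w.1])) d)
                  PySem.Dict.empty) s [])) PySem.Set.empty)
            (fun v => v) false).map (fun vy => (q.1, vy))) := by
  unfold get_potential_velocity_pairs_alt
  dsimp only
  refine Eq.trans (congrArg (fun xr => List.foldl
      (fun (pairs : List (Int × Int)) (q : Int × Int × Int × Bool) =>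
        pairs ++ List.map (fun vy => (q.1, vy))
          (if q.2.2.2 = true then
            List.map (fun w => w.1)
              (List.filter (fun w => w.2.1 || decide (q.2.1 ≤ w.2.2)) (pvYPhase y0 y1).1)
          else
            PySem.List.sorted
              (List.foldl (fun cs s => PySem.Set.update cs ((pvYPhase y0 y1).2.getD s []))
                PySem.Set.empty (PySem.List.pyRange q.2.1 (q.2.2.1 + 1) 1))
              (fun v => v) false)) ([] : List (Int × Int)) xr)
    (Eq.trans (PySem.List.foldl_congr_mem
      (g := fun acc vx => acc ++ ((pvXInterval x0 x1 vx).map (fun r => (vx, r))).toList) _ _ _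
      (by intro acc vx _; cases hv : pvXInterval x0 x1 vx <;> simp [hv]))
      (pvFoldlOpt (fun vx => pvXInterval x0 x1 vx) _ []))) ?_
  rw [pvYPhase_eq]
  simp only [List.nil_append]
  rw [PySem.List.foldl_append_eq_flatMap]
  rfl

-- the bucket lookup, spelled out
lemma pvBucket_spec (y0 y1 s : Int) :
    PySem.Dict.getD ((pvYspec y0 y1).foldl
        (fun d w => w.2.1.foldl
          (fun d s' => PySem.Dict.modify d s' [] (fun l => l ++ [w.1])) d)
        PySem.Dict.empty) s []
    = (((pvYspec y0 y1).filter (fun w => w.2.1.contains s)).map (fun w => w.1)) := by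
  rw [pvBucket_getD s (pvYspec y0 y1) PySem.Dict.empty ?_]
  · simp
  · intro q hq
    unfold pvYspec at hq
    obtain ⟨v, hv, hv2⟩ := List.mem_filterMap.mp hq
    cases hr : pvYRecord y0 y1 v <;> rw [hr] at hv2
    · simp at hv2
    · simp at hv2
      rw [← hv2]
      exact pvYRecord_nodup y0 y1 v hr

-- facts about every y record, via the A-side relation
lemma pvYfacts (y0 y1 : Int) : ∀ q ∈ pvYspec y0 y1,
    q.2.2.2 ∈ q.2.1 ∧ (∀ a ∈ q.2.1, 1 ≤ a ∧ a ≤ q.2.2.2) := by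
  intro q hq
  obtain ⟨p, hp, h1, h2⟩ := pvForall₂_mem_right (pvFy y0 y1) q hq
  exact ⟨h2.2.2.1, h2.2.2.2⟩

lemma pvYpair (y0 y1 : Int) : (pvYspec y0 y1).Pairwise (fun p q => p.1 < q.1) :=
  pvPairwiseFilterMap _ (PySem.List.pairwise_lt_pyRange_one (-1000) 1000)

-- settled-x candidates agree with the canonical condition
lemma pvCands_settled (y0 y1 lo hi : Int) :
    (((pvYspec y0 y1).map (fun w => (w.1, w.2.2.1, w.2.2.2))).filter
        (fun w => w.2.1 || decide (lo ≤ w.2.2))).map (fun w => w.1)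
    = ((pvYspec y0 y1).filter (fun w => pvCond (lo, hi, true) w.2)).map (fun w => w.1) := by
  rw [List.filter_map, List.map_map]
  have hc : ((pvYspec y0 y1).filter
      ((fun w => w.2.1 || decide (lo ≤ w.2.2)) ∘ (fun w => (w.1, w.2.2.1, w.2.2.2))))
      = (pvYspec y0 y1).filter (fun w => pvCond (lo, hi, true) w.2) := by
    apply List.filter_congr
    intro w hw
    obtain ⟨hmem, hb⟩ := pvYfacts y0 y1 w hw
    simp only [Function.comp, pvCond, Bool.true_and]
    rw [Bool.eq_iff_iff]
    simp only [Bool.or_eq_true, List.any_eq_true, decide_eq_true_eq]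
    constructor
    · rintro (h | h)
      · exact Or.inr (Or.inl h)
      · exact Or.inr (Or.inr h)
    · rintro (⟨s, hs, h1, h2⟩ | h | h)
      · exact Or.inr (le_trans h1 (hb s hs).2)
      · exact Or.inl h
      · exact Or.inr h
  rw [hc]
  rfl

-- non-settled-x candidates: the sorted union over the inverted index
lemma pvCands_index (y0 y1 lo hi : Int) :
    PySem.List.sorted
      ((PySem.List.pyRange lo (hi + 1) 1).foldl
        (fun cs s => PySem.Set.update cs
          (((pvYspec y0 y1).filter (fun w => w.2.1.contains s)).map (fun w => w.1)))
        PySem.Set.empty) (fun v => v) false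
    = ((pvYspec y0 y1).filter (fun w => pvCond (lo, hi, false) w.2)).map (fun w => w.1) := by
  set L := ((pvYspec y0 y1).filter (fun w => pvCond (lo, hi, false) w.2)).map (fun w => w.1) with hL
  have hpw : L.Pairwise (· < ·) := by
    rw [hL]
    exact List.pairwise_map.mpr (((pvYpair y0 y1).filter _).imp (fun h => h))
  have hndL : L.Nodup := hpw.imp (fun h => ne_of_lt h)
  set C := (PySem.List.pyRange lo (hi + 1) 1).foldl
      (fun cs s => PySem.Set.update cs
        (((pvYspec y0 y1).filter (fun w => w.2.1.contains s)).map (fun w => w.1)))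
      (PySem.Set.empty : PySem.Set Int) with hC
  have hndC : C.Nodup := pvFoldUpdate_nodup _ _ _ (by simp [PySem.Set.empty])
  have hmem : ∀ a : Int, a ∈ C ↔ a ∈ L := by
    intro a
    rw [hC, pvFoldUpdate_mem, hL]
    simp only [PySem.Set.empty, List.not_mem_nil, false_or, List.mem_map, List.mem_filter,
      PySem.List.mem_pyRange_one]
    constructor
    · rintro ⟨s, ⟨hs1, hs2⟩, w, ⟨hw, hcont⟩, rfl⟩
      refine ⟨w, ⟨hw, ?_⟩, rfl⟩
      simp only [pvCond, Bool.false_and, Bool.or_false, List.any_eq_true, decide_eq_true_eq]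
      exact ⟨s, (PySem.Set.contains_iff _ _).mp hcont, by omega, by omega⟩
    · rintro ⟨w, ⟨hw, hcond⟩, rfl⟩
      simp only [pvCond, Bool.false_and, Bool.or_false, List.any_eq_true,
        decide_eq_true_eq] at hcond
      obtain ⟨s, hs, h1, h2⟩ := hcond
      exact ⟨s, ⟨h1, by omega⟩, w, ⟨hw, (PySem.Set.contains_iff _ _).mpr hs⟩, rfl⟩
  have hperm : L.Perm C := (List.perm_ext_iff_of_nodup hndL hndC).mpr
    (fun a => ((hmem a).symm))
  exact PySem.List.sorted_id_eq_of_perm_of_pairwise _ _ hperm (hpw.imp (fun h => le_of_lt h))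

-- the per-x inner lists agree
lemma pvInnerList_eq {p : Int × List Int} {q : Int × Int × Int × Bool}
    (h2 : pvRX p.2 q.2) :
    ∀ {l1 : List (Int × List Int)} {l2 : List (Int × PySem.Set Int × Bool × Int)},
    List.Forall₂ (fun a b => a.1 = b.1 ∧ pvRY a.2 b.2) l1 l2 →
    (l1.filter (fun w => pvAPairCond p.2 w.2)).map (fun w => (q.1, w.1))
    = (l2.filter (fun w => pvCond q.2 w.2)).map (fun w => (q.1, w.1)) := by
  intro l1 l2 hF
  induction hF with
  | nil => rfl
  | @cons a b l₁ l₂ hr hrest ih =>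
    simp only [List.filter_cons, pvPairCond_eq h2 hr.2]
    by_cases hc : pvCond q.2 b.2 = true
    · simp [hc, hr.1, ih]
    · simp [hc, ih]

-- the whole outputs agree, by walking the two record lists in lockstep
set_option maxRecDepth 40000 in
lemma pvFlat_eq (y0 y1 : Int) :
    ∀ {l1 : List (Int × List Int)} {l2 : List (Int × Int × Int × Bool)},
    List.Forall₂ (fun p q => p.1 = q.1 ∧ pvRX p.2 q.2) l1 l2 →
    l1.flatMap (fun p => ((get_potential_velocities y0 y1 false).filter
        (fun w => pvAPairCond p.2 w.2)).map (fun w => (p.1, w.1)))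
    = l2.flatMap (fun q =>
        (if q.2.2.2 = true then
          (((pvYspec y0 y1).map (fun w => (w.1, w.2.2.1, w.2.2.2))).filter
              (fun w => w.2.1 || decide (q.2.1 ≤ w.2.2))).map (fun w => w.1)
        else
          PySem.List.sorted
            ((PySem.List.pyRange q.2.1 (q.2.2.1 + 1) 1).foldl
              (fun cs s => PySem.Set.update cs (PySem.Dict.getD
                ((pvYspec y0 y1).foldl
                  (fun d w => w.2.1.foldl
                    (fun d s' => PySem.Dict.modify d s' [] (fun l => l ++ [w.1])) d)
                  PySem.Dict.empty) s [])) PySem.Set.empty)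
            (fun v => v) false).map (fun vy => (q.1, vy))) := by
  intro l1 l2 hF
  induction hF with
  | nil => rfl
  | @cons p q l1' l2' hr hrest ih =>
    simp only [List.flatMap_cons]
    rw [ih]
    congr 1
    rw [hr.1, pvInnerList_eq hr.2 (pvFy y0 y1)]
    obtain ⟨hmem, hsx, hnx, hlo1, hlohi⟩ := hr.2
    by_cases hs : q.2.2.2 = true
    · rw [if_pos hs]
      have hq2 : q.2 = (q.2.1, q.2.2.1, true) := by
        rw [← hs]
      rw [pvCands_settled y0 y1 q.2.1 q.2.2.1, List.map_map]
      rw [hq2]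
      rfl
    · have hs' : q.2.2.2 = false := by revert hs; cases q.2.2.2 <;> simp
      rw [if_neg hs]
      have hq2 : q.2 = (q.2.1, q.2.2.1, false) := by
        rw [← hs']
      have hbk : (fun (cs : PySem.Set Int) (s : Int) => PySem.Set.update cs (PySem.Dict.getD
            ((pvYspec y0 y1).foldl
              (fun d w => w.2.1.foldl
                (fun d s' => PySem.Dict.modify d s' [] (fun l => l ++ [w.1])) d)
              PySem.Dict.empty) s []))
          = (fun cs s => PySem.Set.update cs
              (((pvYspec y0 y1).filter (fun w => w.2.1.contains s)).map (fun w => w.1))) := by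
        funext cs s
        rw [pvBucket_spec]
      rw [hbk, pvCands_index y0 y1 q.2.1 q.2.2.1, List.map_map]
      rw [hq2]
      rfl

-- ===== VERDICT (by name: the statement is the Claim_ definition above) =====
set_option maxRecDepth 8000 in
theorem get_potential_velocity_pairs_spec : Claim_equal_get_potential_velocity_pairs := by
  intro x0 x1 y0 y1 _
  unfold Spec_get_potential_velocity_pairs
  rw [pvA_flat, pvB_flat]
  exact pvFlat_eq y0 y1 (pvFx x0 x1)
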